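-- pv_equiv track=rewrite | github.com/jaewoong2/Algo-python | 2021_summer_vacation/DongbinBook.py | divide_city_plan
-- ===== SOURCE A (Python) =====
-- def divide_city_plan(n, m, graph):
--
--     def find(a, parent):
--         if a != parent[a]:
--             return find(parent[a], parent)
--         return parent[a]
--
--     def union(a, b, parent):
--         parent_a = find(a, parent)
--         parent_b = find(b, parent)
--
--         if parent_a < parent_b:
--             parent[parent_b] = parent_a
--         else:
--             parent[parent_a] = parent_b
--
--     def kruskal(graph):
--         max_cost = 0
--         cities = {i: i for i in range(1, n + 1)}
--         sorted_graph = []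
--         result = 0
--
--         for node in graph:
--             for vertex in graph[node]:
--                 sorted_graph.append([node, vertex, graph[node][vertex]])
--
--         sorted_graph.sort(key= lambda x: x[2])
--
--         for v in sorted_graph:
--             a, b, cost = v
--             if find(a, cities) != find(b, cities):
--                 union(a, b, cities)
--                 result += cost
--                 max_cost = cost
--
--         return result - max_cost
--
--
--     return kruskal(graph)
-- ===== SOURCE B (Python) =====
-- def divide_city_plan(n, m, graph):
--     # Kruskal via a component-label map (each node labelled with the minimum
--     # node of its component, merged by relabelling) instead of a parent forest
--     # with recursive find/union; tree-edge costs are collected and aggregated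
--     # at the end.
--     edges = sorted([(a, b, c) for a, nbrs in graph.items() for b, c in nbrs.items()],
--                    key=lambda e: e[2])
--     comp = {i: i for i in range(1, n + 1)}
--     picked = []
--     for a, b, c in edges:
--         ra, rb = comp[a], comp[b]
--         if ra != rb:
--             lo, hi = (ra, rb) if ra < rb else (rb, ra)
--             comp = {v: (lo if r == hi else r) for v, r in comp.items()}
--             picked.append(c)
--     # edges are scanned in ascending cost order, so the last tree edge is the
--     # most expensive one
--     return sum(picked) - (picked[-1] if picked else 0)
-- ===== Notes on version B (the rewrite author's own statement) =====
-- stated objective: alternative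
-- what changed: Kruskal's union-find with recursive find and parent-pointer union is replaced by a component-label map (every node labelled with the minimum node of its component, merges done by relabelling the whole map) and the tree-edge costs are collected in a list and aggregated once at the end instead of running-sum/last-cost accumulators.
import Mathlib
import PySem

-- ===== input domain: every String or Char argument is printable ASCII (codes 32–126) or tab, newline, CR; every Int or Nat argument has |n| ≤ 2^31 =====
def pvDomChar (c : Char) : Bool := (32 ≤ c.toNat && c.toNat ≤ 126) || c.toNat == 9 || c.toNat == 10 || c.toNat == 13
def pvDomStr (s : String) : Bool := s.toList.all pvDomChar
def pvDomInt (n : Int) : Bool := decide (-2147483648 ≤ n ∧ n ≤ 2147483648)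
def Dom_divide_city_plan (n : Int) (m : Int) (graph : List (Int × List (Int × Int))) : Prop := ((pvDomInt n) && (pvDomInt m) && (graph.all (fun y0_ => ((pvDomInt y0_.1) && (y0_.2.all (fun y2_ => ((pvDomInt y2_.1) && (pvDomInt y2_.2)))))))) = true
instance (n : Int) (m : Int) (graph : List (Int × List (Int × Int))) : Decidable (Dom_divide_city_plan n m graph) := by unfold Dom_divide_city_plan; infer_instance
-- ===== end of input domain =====

-- B replaces A's recursive union-find Kruskal by a Kruskal over a component-label
-- map (minimum-node labels, merges by relabelling) that collects the tree-edge
-- costs in a list and aggregates them once at the end (objective: alternative).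


-- ===== PORT A =====
-- def find(a, parent): recursion ported with a fuel counter n.toNat + 1; under
-- Pre_ the parent chain strictly decreases inside {1..n}, so the fuel is never
-- exhausted (lemma pvFindA_root below).  parent[a] is getD a a: exact under
-- Pre_, which guarantees the key is present (Python raises KeyError otherwise).
def pvFindA (parent : PySem.Dict Int Int) : Nat → Int → Int
  | 0, a => a
  | f + 1, a =>
    let pa := parent.getD a a
    if a ≠ pa then pvFindA parent f pa else pa

def pvUnionA (a b : Int) (parent : PySem.Dict Int Int) (fuel : Nat) : PySem.Dict Int Int :=
  let pa := pvFindA parent fuel a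
  let pb := pvFindA parent fuel b
  if pa < pb then parent.insert pb pa else parent.insert pa pb

def divide_city_plan (n : Int) (m : Int) (graph : List (Int × List (Int × Int))) : Int :=
  -- kruskal(graph)
  let fuel := n.toNat + 1
  -- cities = {i: i for i in range(1, n + 1)}
  let cities := (PySem.List.pyRange 1 (n + 1) 1).foldl
      (fun d i => d.insert i i) (PySem.Dict.empty : PySem.Dict Int Int)
  -- for node in graph: for vertex in graph[node]: sorted_graph.append(...)
  -- (graph[node] = the node's own value list: exact under Pre_, keys unique)
  let sorted_graph := PySem.List.sorted
      (graph.foldl (fun acc p =>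
        p.2.foldl (fun acc2 q => acc2 ++ [(p.1, q.1, q.2)]) acc) [])
      (fun e => e.2.2) false
  -- for v in sorted_graph: ... (state = (cities, result, max_cost))
  let st := sorted_graph.foldl
      (fun (st : PySem.Dict Int Int × Int × Int) e =>
        if pvFindA st.1 fuel e.1 ≠ pvFindA st.1 fuel e.2.1 then
          (pvUnionA e.1 e.2.1 st.1 fuel, st.2.1 + e.2.2, e.2.2)
        else st)
      (cities, 0, 0)
  st.2.1 - st.2.2

-- ===== PORT B =====
-- comp = {v: (lo if r == hi else r) for v, r in comp.items()}
def pvRelabel (comp : PySem.Dict Int Int) (hi lo : Int) : PySem.Dict Int Int :=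
  PySem.Dict.mk (comp.items.map (fun p => (p.1, if p.2 = hi then lo else p.2)))

def divide_city_plan_alt (n : Int) (m : Int) (graph : List (Int × List (Int × Int))) : Int :=
  let edges := PySem.List.sorted
      (graph.flatMap (fun p => p.2.map (fun q => (p.1, q.1, q.2))))
      (fun e => e.2.2) false
  let comp0 := (PySem.List.pyRange 1 (n + 1) 1).foldl
      (fun d i => d.insert i i) (PySem.Dict.empty : PySem.Dict Int Int)
  -- comp[a] / comp[b] as getD: exact under Pre_ (keys 1..n present)
  let st := edges.foldl
      (fun (st : PySem.Dict Int Int × List Int) e =>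
        let ra := st.1.getD e.1 e.1
        let rb := st.1.getD e.2.1 e.2.1
        if ra ≠ rb then
          ((if ra < rb then pvRelabel st.1 rb ra else pvRelabel st.1 ra rb),
           st.2 ++ [e.2.2])
        else st)
      (comp0, ([] : List Int))
  -- sum(picked) - (picked[-1] if picked else 0)
  st.2.sum - (st.2.getLast?.getD 0)

-- ===== PRECONDITION & SPEC =====
-- Pre_ excludes (i) edges with an endpoint outside 1..n, on which Python A
-- raises KeyError (and B does too), and (ii) association lists with duplicate
-- outer or inner keys, which do not represent a Python dict input (a dict
-- collapses them before A ever runs).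
def Pre_divide_city_plan (n : Int) (m : Int) (graph : List (Int × List (Int × Int))) : Prop :=
  (graph.map Prod.fst).Nodup ∧
  ∀ p ∈ graph, (p.2.map Prod.fst).Nodup ∧
    ∀ q ∈ p.2, (1 ≤ p.1 ∧ p.1 ≤ n) ∧ (1 ≤ q.1 ∧ q.1 ≤ n)
instance (n : Int) (m : Int) (graph : List (Int × List (Int × Int))) : Decidable (Pre_divide_city_plan n m graph) := by unfold Pre_divide_city_plan; infer_instance

def pvWitness_divide_city_plan : Int × Int × (List (Int × List (Int × Int))) :=
  (3, 2, [(1, [(2, 1)]), (2, [(3, 5)])])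

def Spec_divide_city_plan (n : Int) (m : Int) (graph : List (Int × List (Int × Int))) (out : Int) : Prop := out = divide_city_plan_alt n m graph
instance (n : Int) (m : Int) (graph : List (Int × List (Int × Int))) (out : Int) : Decidable (Spec_divide_city_plan n m graph out) := by unfold Spec_divide_city_plan; infer_instance

-- ===== CLAIM (what is proved, stated in full; the proofs are below) =====
def Claim_equal_divide_city_plan : Prop := ∀ (n : Int) (m : Int) (graph : List (Int × List (Int × Int))), Dom_divide_city_plan n m graph → Pre_divide_city_plan n m graph → Spec_divide_city_plan n m graph (divide_city_plan n m graph)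

-- ===== LEMMAS AND PROOFS =====
def pvR (n : Int) : List Int := PySem.List.pyRange 1 (n + 1) 1

def GoodA (n : Int) (d : PySem.Dict Int Int) : Prop :=
  d.keys = pvR n ∧ ∀ k v, d.get? k = some v → 1 ≤ v ∧ v ≤ k

def GoodB (n : Int) (c : PySem.Dict Int Int) : Prop :=
  c.keys = pvR n ∧ ∀ k v, c.get? k = some v → c.get? v = some v

def RelAB (n : Int) (d c : PySem.Dict Int Int) : Prop :=
  GoodA n d ∧ GoodB n c ∧ ∀ k ∈ pvR n, pvFindA d (n.toNat + 1) k = c.getD k k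

theorem mem_pvR {n k : Int} : k ∈ pvR n ↔ 1 ≤ k ∧ k < n + 1 := by
  unfold pvR; exact PySem.List.mem_pyRange_one

theorem GoodA_get_some {n : Int} {d : PySem.Dict Int Int} (h : GoodA n d)
    {k : Int} (hk : k ∈ pvR n) : ∃ v, d.get? k = some v := by
  have hm : k ∈ d.keys := by rw [h.1]; exact hk
  cases hv : d.get? k with
  | none => exact absurd ((PySem.Dict.get?_eq_none_iff_not_mem_keys _ _).mp hv) (by simp [hm])
  | some v => exact ⟨v, rfl⟩

theorem pvFindA_root {n : Int} {d : PySem.Dict Int Int} (h : GoodA n d) :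
    ∀ (t : Nat) (k : Int) (f : Nat), k.toNat ≤ t → k.toNat ≤ f → k ∈ pvR n →
      pvFindA d f k ∈ pvR n ∧ d.get? (pvFindA d f k) = some (pvFindA d f k) := by
  intro t
  induction t with
  | zero =>
    intro k f ht _ hk
    exact absurd ht (by have := (mem_pvR.mp hk).1; omega)
  | succ t ih =>
    intro k f ht hf hk
    obtain ⟨hk1, hk2⟩ := mem_pvR.mp hk
    cases f with
    | zero => exact absurd hf (by omega)
    | succ f =>
      obtain ⟨v, hv⟩ := GoodA_get_some h hk
      obtain ⟨hv1, hv2⟩ := h.2 k v hv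
      have hgd : d.getD k k = v := PySem.Dict.getD_of_get?_eq_some _ _ hv
      by_cases hvk : v = k
      · simp [pvFindA, hgd, hvk, hk, hv]
      · have hlt : v < k := lt_of_le_of_ne hv2 hvk
        have hres : pvFindA d (f + 1) k = pvFindA d f v := by
          simp [pvFindA, hgd, Ne.symm hvk]
        rw [hres]
        exact ih v f (by omega) (by omega) (mem_pvR.mpr ⟨hv1, by omega⟩)

theorem pvFindA_insert {n : Int} {d : PySem.Dict Int Int} (h : GoodA n d)
    {lo hi : Int} (hlo : lo ∈ pvR n) (hhi : hi ∈ pvR n) (hlt : lo < hi)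
    (hrlo : d.get? lo = some lo) (hrhi : d.get? hi = some hi) :
    ∀ (t : Nat) (k : Int) (f : Nat), k.toNat ≤ t → k.toNat ≤ f → k ∈ pvR n →
      pvFindA (d.insert hi lo) f k =
        if pvFindA d f k = hi then lo else pvFindA d f k := by
  intro t
  induction t with
  | zero =>
    intro k f ht _ hk
    exact absurd ht (by have := (mem_pvR.mp hk).1; omega)
  | succ t ih =>
    intro k f ht hf hk
    obtain ⟨hk1, hk2⟩ := mem_pvR.mp hk
    cases f with
    | zero => exact absurd hf (by omega)
    | succ f =>
      by_cases hkh : k = hi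
      · subst hkh
        have hgd : d.getD k k = k := PySem.Dict.getD_of_get?_eq_some _ _ hrhi
        have hgd' : (d.insert k lo).getD k k = lo := by
          rw [PySem.Dict.getD_of_get?_eq_some _ _ (PySem.Dict.get?_insert_self _ _ _)]
        have hne : lo ≠ k := ne_of_lt hlt
        have hL : pvFindA (d.insert k lo) (f + 1) k = pvFindA (d.insert k lo) f lo := by
          simp [pvFindA, hgd', Ne.symm hne]
        have hlo' : (d.insert k lo).getD lo lo = lo := by
          rw [PySem.Dict.getD_of_get?_eq_some _ _ (by rw [PySem.Dict.get?_insert_of_ne _ _ hne]; exact hrlo)]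
        have hL2 : pvFindA (d.insert k lo) f lo = lo := by
          cases f with
          | zero => simp [pvFindA]
          | succ f => simp [pvFindA, hlo']
        have hR : pvFindA d (f + 1) k = k := by simp [pvFindA, hgd]
        rw [hL, hL2, hR]; simp
      · obtain ⟨v, hv⟩ := GoodA_get_some h hk
        obtain ⟨hv1, hv2⟩ := h.2 k v hv
        have hgd : d.getD k k = v := PySem.Dict.getD_of_get?_eq_some _ _ hv
        have hgd' : (d.insert hi lo).getD k k = v := by
          rw [PySem.Dict.getD_of_get?_eq_some _ _ (by rw [PySem.Dict.get?_insert_of_ne _ _ hkh]; exact hv)]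
        by_cases hvk : v = k
        · simp [pvFindA, hgd, hgd', hvk, hkh]
        · have hlt' : v < k := lt_of_le_of_ne hv2 hvk
          have hL : pvFindA (d.insert hi lo) (f + 1) k = pvFindA (d.insert hi lo) f v := by
            simp [pvFindA, hgd', Ne.symm hvk]
          have hR : pvFindA d (f + 1) k = pvFindA d f v := by
            simp [pvFindA, hgd, Ne.symm hvk]
          rw [hL, hR]
          exact ih v f (by omega) (by omega) (mem_pvR.mpr ⟨hv1, by omega⟩)

theorem pvRelabel_get? (comp : PySem.Dict Int Int) (hi lo k : Int) :
    (pvRelabel comp hi lo).get? k =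
      (comp.get? k).map (fun r => if r = hi then lo else r) := by
  obtain ⟨l⟩ := comp
  unfold pvRelabel
  induction l with
  | nil => simp [PySem.Dict.get?]
  | cons p rest ih =>
    obtain ⟨a, r⟩ := p
    by_cases hpk : a = k
    · simp [PySem.Dict.get?_mk_cons, hpk]
    · simp [PySem.Dict.get?_mk_cons, hpk, ih]

theorem pvRelabel_keys (comp : PySem.Dict Int Int) (hi lo : Int) :
    (pvRelabel comp hi lo).keys = comp.keys := by
  obtain ⟨l⟩ := comp
  unfold pvRelabel
  simp [PySem.Dict.keys, PySem.Dict.items, List.map_map, Function.comp]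

theorem keys_get_some {n : Int} {d : PySem.Dict Int Int} (h : d.keys = pvR n)
    {k : Int} (hk : k ∈ pvR n) : ∃ v, d.get? k = some v := by
  have hm : k ∈ d.keys := by rw [h]; exact hk
  cases hv : d.get? k with
  | none => exact absurd ((PySem.Dict.get?_eq_none_iff_not_mem_keys _ _).mp hv) (by simp [hm])
  | some v => exact ⟨v, rfl⟩

theorem step_rel {n : Int} {d c : PySem.Dict Int Int} (h : RelAB n d c)
    {lo hi : Int} (hlo : lo ∈ pvR n) (hhi : hi ∈ pvR n) (hlt : lo < hi)
    (hrlo : d.get? lo = some lo) (hrhi : d.get? hi = some hi)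
    (hclo : c.get? lo = some lo) :
    RelAB n (d.insert hi lo) (pvRelabel c hi lo) := by
  obtain ⟨hA, hB, hF⟩ := h
  have hloR := mem_pvR.mp hlo
  have hhiR := mem_pvR.mp hhi
  have hcont : d.contains hi = true := by
    rw [PySem.Dict.contains_iff_mem_keys, hA.1]; exact hhi
  have hA' : GoodA n (d.insert hi lo) := by
    constructor
    · rw [PySem.Dict.keys_insert_of_contains _ _ hcont]; exact hA.1
    · intro k v hv
      rw [PySem.Dict.get?_insert] at hv
      by_cases hk : k = hi
      · simp [hk] at hv; omega
      · simp [hk] at hv; exact hA.2 k v hv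
  refine ⟨hA', ⟨?_, ?_⟩, ?_⟩
  · rw [pvRelabel_keys]; exact hB.1
  · intro k v hv
    rw [pvRelabel_get?] at hv ⊢
    cases hck : c.get? k with
    | none => simp [hck] at hv
    | some r =>
      simp [hck] at hv
      by_cases hr : r = hi
      · have hvlo : v = lo := by simp [hr] at hv; omega
        subst hvlo
        simp [hclo, ne_of_lt hlt]
      · have hvr : v = r := by simp [hr] at hv; omega
        subst hvr
        simp [hB.2 k v hck, hr]
  · intro k hk
    have hkF : k.toNat ≤ n.toNat + 1 := by
      have := mem_pvR.mp hk; omega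
    rw [pvFindA_insert hA hlo hhi hlt hrlo hrhi k.toNat k (n.toNat + 1) le_rfl hkF hk]
    rw [hF k hk]
    obtain ⟨rk, hrk⟩ := keys_get_some hB.1 hk
    rw [PySem.Dict.getD_of_get?_eq_some _ _ hrk]
    rw [PySem.Dict.getD_of_get?_eq_some _ _ (by rw [pvRelabel_get?, hrk]; rfl)]

theorem find_facts {n : Int} {d c : PySem.Dict Int Int} (h : RelAB n d c)
    {a : Int} (ha : a ∈ pvR n) :
    pvFindA d (n.toNat + 1) a ∈ pvR n ∧
    d.get? (pvFindA d (n.toNat + 1) a) = some (pvFindA d (n.toNat + 1) a) ∧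
    c.get? (pvFindA d (n.toNat + 1) a) = some (pvFindA d (n.toNat + 1) a) := by
  have haF : a.toNat ≤ n.toNat + 1 := by have := mem_pvR.mp ha; omega
  obtain ⟨hmem, hroot⟩ := pvFindA_root h.1 a.toNat a (n.toNat + 1) le_rfl haF ha
  refine ⟨hmem, hroot, ?_⟩
  obtain ⟨v, hv⟩ := keys_get_some h.2.1.1 ha
  have : pvFindA d (n.toNat + 1) a = c.getD a a := h.2.2 a ha
  rw [PySem.Dict.getD_of_get?_eq_some _ _ hv] at this
  rw [this]
  exact h.2.1.2 a v hv

def pvStepA (n : Int) (st : PySem.Dict Int Int × Int × Int) (e : Int × Int × Int) :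
    PySem.Dict Int Int × Int × Int :=
  if pvFindA st.1 (n.toNat + 1) e.1 ≠ pvFindA st.1 (n.toNat + 1) e.2.1 then
    (pvUnionA e.1 e.2.1 st.1 (n.toNat + 1), st.2.1 + e.2.2, e.2.2)
  else st

def pvStepB (st : PySem.Dict Int Int × List Int) (e : Int × Int × Int) :
    PySem.Dict Int Int × List Int :=
  if st.1.getD e.1 e.1 ≠ st.1.getD e.2.1 e.2.1 then
    ((if st.1.getD e.1 e.1 < st.1.getD e.2.1 e.2.1 then
        pvRelabel st.1 (st.1.getD e.2.1 e.2.1) (st.1.getD e.1 e.1)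
      else pvRelabel st.1 (st.1.getD e.1 e.1) (st.1.getD e.2.1 e.2.1)),
     st.2 ++ [e.2.2])
  else st

theorem loop_sim (n : Int) :
    ∀ (es : List (Int × Int × Int)) (d c : PySem.Dict Int Int)
      (res maxc : Int) (picked : List Int),
      (∀ e ∈ es, e.1 ∈ pvR n ∧ e.2.1 ∈ pvR n) → RelAB n d c →
      res = picked.sum → maxc = picked.getLast?.getD 0 →
      (es.foldl (pvStepA n) (d, res, maxc)).2.1 = ((es.foldl pvStepB (c, picked)).2).sum ∧
      (es.foldl (pvStepA n) (d, res, maxc)).2.2 = ((es.foldl pvStepB (c, picked)).2).getLast?.getD 0 := by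
  intro es
  induction es with
  | nil =>
    intro d c res maxc picked _ _ hres hmax
    simpa using ⟨hres, hmax⟩
  | cons e es ih =>
    intro d c res maxc picked hends hrel hres hmax
    obtain ⟨ha, hb⟩ := hends e (List.mem_cons_self)
    have hends' : ∀ e' ∈ es, e'.1 ∈ pvR n ∧ e'.2.1 ∈ pvR n :=
      fun e' he' => hends e' (List.mem_cons_of_mem _ he')
    have hfa : pvFindA d (n.toNat + 1) e.1 = c.getD e.1 e.1 := hrel.2.2 _ ha
    have hfb : pvFindA d (n.toNat + 1) e.2.1 = c.getD e.2.1 e.2.1 := hrel.2.2 _ hb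
    simp only [List.foldl_cons]
    by_cases hcond : pvFindA d (n.toNat + 1) e.1 = pvFindA d (n.toNat + 1) e.2.1
    · have hA : pvStepA n (d, res, maxc) e = (d, res, maxc) := by
        unfold pvStepA; rw [if_neg (by simpa using hcond)]
      have hB : pvStepB (c, picked) e = (c, picked) := by
        unfold pvStepB; rw [if_neg (by rw [← hfa, ← hfb]; simpa using hcond)]
      rw [hA, hB]
      exact ih d c res maxc picked hends' hrel hres hmax
    · obtain ⟨hmemA, hrootA, hcrootA⟩ := find_facts hrel ha
      obtain ⟨hmemB, hrootB, hcrootB⟩ := find_facts hrel hb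
      have hsum : res + e.2.2 = (picked ++ [e.2.2]).sum := by simp [hres]
      have hlast : e.2.2 = ((picked ++ [e.2.2]).getLast?).getD 0 := by simp
      have hA : pvStepA n (d, res, maxc) e
          = (pvUnionA e.1 e.2.1 d (n.toNat + 1), res + e.2.2, e.2.2) := by
        unfold pvStepA; rw [if_pos (by simpa using hcond)]
      by_cases hlt : pvFindA d (n.toNat + 1) e.1 < pvFindA d (n.toNat + 1) e.2.1
      · have hB : pvStepB (c, picked) e
            = (pvRelabel c (pvFindA d (n.toNat + 1) e.2.1) (pvFindA d (n.toNat + 1) e.1),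
               picked ++ [e.2.2]) := by
          unfold pvStepB
          rw [if_pos (by rw [← hfa, ← hfb]; simpa using hcond)]
          rw [← hfa, ← hfb, if_pos hlt]
        have hu : pvUnionA e.1 e.2.1 d (n.toNat + 1)
            = d.insert (pvFindA d (n.toNat + 1) e.2.1) (pvFindA d (n.toNat + 1) e.1) := by
          unfold pvUnionA; rw [if_pos hlt]
        rw [hA, hB, hu]
        exact ih _ _ _ _ _ hends'
          (step_rel hrel hmemA hmemB hlt hrootA hrootB hcrootA) hsum hlast
      · have hlt' : pvFindA d (n.toNat + 1) e.2.1 < pvFindA d (n.toNat + 1) e.1 :=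
          lt_of_le_of_ne (not_lt.mp hlt) (Ne.symm hcond)
        have hB : pvStepB (c, picked) e
            = (pvRelabel c (pvFindA d (n.toNat + 1) e.1) (pvFindA d (n.toNat + 1) e.2.1),
               picked ++ [e.2.2]) := by
          unfold pvStepB
          rw [if_pos (by rw [← hfa, ← hfb]; simpa using hcond)]
          rw [← hfa, ← hfb, if_neg hlt]
        have hu : pvUnionA e.1 e.2.1 d (n.toNat + 1)
            = d.insert (pvFindA d (n.toNat + 1) e.1) (pvFindA d (n.toNat + 1) e.2.1) := by
          unfold pvUnionA; rw [if_neg hlt]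
        rw [hA, hB, hu]
        exact ih _ _ _ _ _ hends'
          (step_rel hrel hmemB hmemA hlt' hrootB hrootA hcrootB) hsum hlast

theorem init_rel (n : Int) :
    RelAB n ((PySem.List.pyRange 1 (n + 1) 1).foldl
        (fun d i => d.insert i i) (PySem.Dict.empty : PySem.Dict Int Int))
      ((PySem.List.pyRange 1 (n + 1) 1).foldl
        (fun d i => d.insert i i) (PySem.Dict.empty : PySem.Dict Int Int)) := by
  have hitems : ((PySem.List.pyRange 1 (n + 1) 1).foldl
      (fun d i => d.insert i i) (PySem.Dict.empty : PySem.Dict Int Int)).items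
      = (PySem.List.pyRange 1 (n + 1) 1).map (fun i => (i, i)) := by
    have := PySem.Dict.items_foldl_insert_fresh (PySem.List.pyRange 1 (n + 1) 1)
      (fun i => i) (fun i => i) (PySem.Dict.empty : PySem.Dict Int Int)
      (fun a _ => PySem.Dict.contains_empty a)
      (by simpa using PySem.List.nodup_pyRange_one 1 (n + 1))
    simpa using this
  have hkeys : ((PySem.List.pyRange 1 (n + 1) 1).foldl
      (fun d i => d.insert i i) (PySem.Dict.empty : PySem.Dict Int Int)).keys = pvR n := by
    simp only [PySem.Dict.keys, hitems, List.map_map]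
    simp [pvR, Function.comp_def]
  have hnd : ((PySem.List.pyRange 1 (n + 1) 1).foldl
      (fun d i => d.insert i i) (PySem.Dict.empty : PySem.Dict Int Int)).keys.Nodup := by
    rw [hkeys]; unfold pvR; exact PySem.List.nodup_pyRange_one 1 (n + 1)
  have hget : ∀ k v, ((PySem.List.pyRange 1 (n + 1) 1).foldl
      (fun d i => d.insert i i) (PySem.Dict.empty : PySem.Dict Int Int)).get? k = some v → v = k := by
    intro k v hv
    rw [PySem.Dict.get?_eq_some_iff_mem_items _ _ _ hnd, hitems] at hv
    obtain ⟨i, _, hi⟩ := List.mem_map.mp hv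
    have h1 : i = k := congrArg Prod.fst hi
    have h2 : i = v := congrArg Prod.snd hi
    omega
  have hself : ∀ k v, ((PySem.List.pyRange 1 (n + 1) 1).foldl
      (fun d i => d.insert i i) (PySem.Dict.empty : PySem.Dict Int Int)).get? k = some v →
      ((PySem.List.pyRange 1 (n + 1) 1).foldl
      (fun d i => d.insert i i) (PySem.Dict.empty : PySem.Dict Int Int)).get? k = some k := by
    intro k v hv
    rw [hget k v hv] at hv
    exact hv
  refine ⟨⟨hkeys, ?_⟩, ⟨hkeys, ?_⟩, ?_⟩
  · intro k v hv
    have hvk := hget k v hv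
    have hkmem : k ∈ pvR n := by
      rw [← hkeys]
      exact PySem.Dict.mem_keys_of_mem_items _
        ((PySem.Dict.get?_eq_some_iff_mem_items _ _ _ hnd).mp hv)
    have := mem_pvR.mp hkmem
    omega
  · intro k v hv
    have hvk := hget k v hv
    rw [hvk]
    exact hself k v hv
  · intro k hk
    obtain ⟨v, hv⟩ := keys_get_some hkeys hk
    have hvk : ((PySem.List.pyRange 1 (n + 1) 1).foldl
        (fun d i => d.insert i i) (PySem.Dict.empty : PySem.Dict Int Int)).get? k = some k :=
      hself k v hv
    rw [PySem.Dict.getD_of_get?_eq_some _ _ hvk]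
    simp [pvFindA, PySem.Dict.getD_of_get?_eq_some _ _ hvk]

theorem edges_eq (graph : List (Int × List (Int × Int))) :
    graph.foldl (fun acc p =>
        p.2.foldl (fun acc2 q => acc2 ++ [(p.1, q.1, q.2)]) acc) []
      = graph.flatMap (fun p => p.2.map (fun q => (p.1, q.1, q.2))) := by
  calc graph.foldl (fun acc p =>
          p.2.foldl (fun acc2 q => acc2 ++ [(p.1, q.1, q.2)]) acc) []
      = graph.foldl (fun acc p => acc ++ p.2.map (fun q => (p.1, q.1, q.2))) [] :=
        PySem.List.foldl_congr_mem _ _ _ _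
          (fun acc p _ => PySem.List.foldl_append_singleton_eq_map _ _ _)
    _ = graph.flatMap (fun p => p.2.map (fun q => (p.1, q.1, q.2))) := by
        simpa using PySem.List.foldl_append_eq_flatMap
          (fun p : Int × List (Int × Int) => p.2.map (fun q => (p.1, q.1, q.2))) graph []

theorem main_eq (n m : Int) (graph : List (Int × List (Int × Int)))
    (hpre : Pre_divide_city_plan n m graph) :
    divide_city_plan n m graph = divide_city_plan_alt n m graph := by
  show ((PySem.List.sorted
          (graph.foldl (fun acc p =>
            p.2.foldl (fun acc2 q => acc2 ++ [(p.1, q.1, q.2)]) acc) [])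
          (fun e => e.2.2) false).foldl (pvStepA n)
        (((PySem.List.pyRange 1 (n + 1) 1).foldl
            (fun d i => d.insert i i) (PySem.Dict.empty : PySem.Dict Int Int)), 0, 0)).2.1
      - ((PySem.List.sorted
          (graph.foldl (fun acc p =>
            p.2.foldl (fun acc2 q => acc2 ++ [(p.1, q.1, q.2)]) acc) [])
          (fun e => e.2.2) false).foldl (pvStepA n)
        (((PySem.List.pyRange 1 (n + 1) 1).foldl
            (fun d i => d.insert i i) (PySem.Dict.empty : PySem.Dict Int Int)), 0, 0)).2.2
    = (((PySem.List.sorted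
          (graph.flatMap (fun p => p.2.map (fun q => (p.1, q.1, q.2))))
          (fun e => e.2.2) false).foldl pvStepB
        (((PySem.List.pyRange 1 (n + 1) 1).foldl
            (fun d i => d.insert i i) (PySem.Dict.empty : PySem.Dict Int Int)),
         ([] : List Int))).2).sum
      - (((PySem.List.sorted
          (graph.flatMap (fun p => p.2.map (fun q => (p.1, q.1, q.2))))
          (fun e => e.2.2) false).foldl pvStepB
        (((PySem.List.pyRange 1 (n + 1) 1).foldl
            (fun d i => d.insert i i) (PySem.Dict.empty : PySem.Dict Int Int)),
         ([] : List Int))).2).getLast?.getD 0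
  rw [edges_eq]
  have hends : ∀ e ∈ PySem.List.sorted
      (graph.flatMap (fun p => p.2.map (fun q => (p.1, q.1, q.2))))
      (fun e => e.2.2) false, e.1 ∈ pvR n ∧ e.2.1 ∈ pvR n := by
    intro e he
    rw [PySem.List.mem_sorted] at he
    obtain ⟨p, hp, he2⟩ := List.mem_flatMap.mp he
    obtain ⟨q, hq, rfl⟩ := List.mem_map.mp he2
    obtain ⟨⟨h1, h2⟩, ⟨h3, h4⟩⟩ := (hpre.2 p hp).2 q hq
    refine ⟨mem_pvR.mpr ⟨?_, ?_⟩, mem_pvR.mpr ⟨?_, ?_⟩⟩ <;> dsimp only <;> omega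
  obtain ⟨h1, h2⟩ := loop_sim n
    (PySem.List.sorted
      (graph.flatMap (fun p => p.2.map (fun q => (p.1, q.1, q.2))))
      (fun e => e.2.2) false)
    _ _ 0 0 [] hends (init_rel n) rfl rfl
  rw [h1, h2]


-- ===== VERDICT (by name: the statement is the Claim_ definition above) =====
theorem divide_city_plan_spec : Claim_equal_divide_city_plan := by
  intro n m graph _ hpre
  exact main_eq n m graph hpre
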